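-- pv_equiv track=rewrite | github.com/rubenroques/goma-sportsbook-ios | Tools/migrate_gomaui_localization.py | ensure_import
-- ===== SOURCE A (Python) =====
-- def ensure_import(swift_content: str, module: str = "GomaUI") -> str:
--     """Ensure import statement exists"""
--     lines = swift_content.split('\n')
--
--     # Check if import already exists
--     for line in lines:
--         if f'import {module}' in line:
--             return swift_content
--
--     # Find where to insert (after other imports)
--     insert_idx = 0
--     for i, line in enumerate(lines):
--         if line.startswith('import '):
--             insert_idx = i + 1
--
--     # Insert import
--     lines.insert(insert_idx, f'import {module}')
--
--     return '\n'.join(lines)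
-- ===== SOURCE B (Python) =====
-- def ensure_import(swift_content: str, module: str = "GomaUI") -> str:
--     """Ensure import statement exists"""
--     stmt = f'import {module}'
--     lines = swift_content.split('\n')
--     out = []            # result lines, built back-to-front (reversed)
--     seen_import = False
--     for line in reversed(lines):
--         if stmt in line:
--             return swift_content
--         if line.startswith('import ') and not seen_import:
--             out.append(stmt)   # stmt goes right after the last import line
--             seen_import = True
--         out.append(line)
--     if not seen_import:
--         out.append(stmt)       # no import lines at all: stmt becomes the first line
--     return '\n'.join(reversed(out))
-- ===== Notes on version B (the rewrite author's own statement) =====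
-- stated objective: alternative
-- what changed: B replaces A's two forward scans (a containment scan, then an enumerate scan tracking an integer insertion index fed to list.insert) with a single backward pass over the lines that builds the output list directly with a seen-import flag and no index arithmetic, fusing the existence check into the same loop.
import Mathlib
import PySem

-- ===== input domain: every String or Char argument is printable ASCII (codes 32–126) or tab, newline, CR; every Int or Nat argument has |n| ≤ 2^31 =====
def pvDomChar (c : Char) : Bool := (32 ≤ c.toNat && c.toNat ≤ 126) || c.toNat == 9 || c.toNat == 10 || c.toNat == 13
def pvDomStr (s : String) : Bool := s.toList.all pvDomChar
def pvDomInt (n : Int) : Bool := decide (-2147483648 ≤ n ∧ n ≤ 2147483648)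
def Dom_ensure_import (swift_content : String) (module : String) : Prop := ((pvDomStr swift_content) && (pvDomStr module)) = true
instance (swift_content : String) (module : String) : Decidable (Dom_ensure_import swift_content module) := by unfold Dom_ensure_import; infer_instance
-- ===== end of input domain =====

-- B replaces A's two forward scans plus index-tracked list.insert by one backward pass that
-- builds the output list directly with a seen-import flag and no index arithmetic (alternative
-- decomposition, same cost).


-- ===== PORT A =====
-- lines = swift_content.split('\n'); the early-return loop 'for line in lines: if stmt in line: return'
-- is ported as List.any; the insert_idx loop is a foldl over enumerate keeping last match + 1;
-- lines.insert(insert_idx, stmt); '\n'.join(lines)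
def ensure_import (swift_content : String) (module : String) : String :=
  let lines : List String := (PySem.Str.split? swift_content "\n").getD []
  if lines.any (fun line => PySem.Str.isIn ("import " ++ module) line) then
    swift_content
  else
    let insert_idx : Int := (PySem.List.enumerate lines 0).foldl
      (fun acc p => if PySem.Str.startswith p.2 "import " then p.1 + 1 else acc) 0
    PySem.Str.join "\n" (PySem.List.insert lines insert_idx ("import " ++ module))

-- ===== PORT B =====
-- the backward loop of Source B: state (out, seen_import); 'return swift_content' inside the loop is
-- modelled as returning none; out.append(x) is out ++ [x]; afterwards '\n'.join(reversed(out))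
def pvGo (stmt : String) : List String → List String → Bool → Option (List String × Bool)
  | [], out, seen => some (out, seen)
  | line :: rest, out, seen =>
    if PySem.Str.isIn stmt line then none
    else if PySem.Str.startswith line "import " && !seen then
      pvGo stmt rest (out ++ [stmt, line]) true
    else
      pvGo stmt rest (out ++ [line]) seen

def ensure_import_alt (swift_content : String) (module : String) : String :=
  let stmt := "import " ++ module
  let lines : List String := (PySem.Str.split? swift_content "\n").getD []
  match pvGo stmt lines.reverse [] false with
  | none => swift_content
  | some (out, seen) =>
      let out' := if !seen then out ++ [stmt] else out
      PySem.Str.join "\n" out'.reverse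

-- ===== PRECONDITION & SPEC =====
def Spec_ensure_import (swift_content : String) (module : String) (out : String) : Prop := out = ensure_import_alt swift_content module
instance (swift_content : String) (module : String) (out : String) : Decidable (Spec_ensure_import swift_content module out) := by unfold Spec_ensure_import; infer_instance

-- ===== CLAIM (what is proved, stated in full; the proofs are below) =====
def Claim_equal_ensure_import : Prop := ∀ (swift_content : String) (module : String), Dom_ensure_import swift_content module → Spec_ensure_import swift_content module (ensure_import swift_content module)

-- ===== LEMMAS AND PROOFS =====

-- pure (accumulator-free) description of pvGo's output list in the no-early-return case
def pvBld (stmt : String) : List String → Bool → List String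
  | [], _ => []
  | l :: r, seen =>
    if PySem.Str.startswith l "import " && !seen then stmt :: l :: pvBld stmt r true
    else l :: pvBld stmt r seen

theorem pvGo_none (stmt : String) (rl : List String) :
    ∀ (acc : List String) (seen : Bool), (∃ l ∈ rl, PySem.Str.isIn stmt l = true) →
    pvGo stmt rl acc seen = none := by
  induction rl with
  | nil => rintro acc seen ⟨l, hl, _⟩; cases hl
  | cons line rest ih =>
      rintro acc seen ⟨l, hl, hin⟩
      rcases List.mem_cons.1 hl with rfl | hl
      · simp only [pvGo, hin, reduceIte]
      · cases h : PySem.Str.isIn stmt line with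
        | true => simp only [pvGo, h, reduceIte]
        | false =>
            simp only [pvGo, h, Bool.false_eq_true, reduceIte]
            split <;> exact ih _ _ ⟨l, hl, hin⟩

theorem pvGo_some (stmt : String) (rl : List String) :
    ∀ (acc : List String) (seen : Bool), (∀ l ∈ rl, PySem.Str.isIn stmt l = false) →
    pvGo stmt rl acc seen
      = some (acc ++ pvBld stmt rl seen,
              seen || rl.any (fun l => PySem.Str.startswith l "import ")) := by
  induction rl with
  | nil => intro acc seen _; simp [pvGo, pvBld]
  | cons line rest ih =>
      intro acc seen h
      have hline := h line (List.mem_cons_self ..)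
      have hrest : ∀ l ∈ rest, PySem.Str.isIn stmt l = false :=
        fun l hl => h l (List.mem_cons_of_mem _ hl)
      cases hs : (PySem.Str.startswith line "import " && !seen) with
      | true =>
          have hseen : seen = false := by cases seen <;> simp_all
          subst hseen
          simp only [pvGo, hline, Bool.false_eq_true, reduceIte, hs, ih _ _ hrest, pvBld]
          cases hstart : PySem.Str.startswith line "import " <;> simp_all
      | false =>
          simp only [pvGo, hline, Bool.false_eq_true, reduceIte, hs, ih _ _ hrest, pvBld]
          cases hstart : PySem.Str.startswith line "import " <;> cases seen <;> simp_all

theorem pvBld_true (stmt : String) (rl : List String) : pvBld stmt rl true = rl := by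
  induction rl with
  | nil => rfl
  | cons l r ih => simp [pvBld, ih]

-- A's insert_idx stays within [0, lines.length]
theorem pvFoldl_bounds (lines : List String) :
    0 ≤ (PySem.List.enumerate lines 0).foldl
          (fun acc p => if PySem.Str.startswith p.2 "import " then p.1 + 1 else acc) 0
    ∧ (PySem.List.enumerate lines 0).foldl
          (fun acc p => if PySem.Str.startswith p.2 "import " then p.1 + 1 else acc) 0
        ≤ (lines.length : Int) := by
  have hmem : ∀ p ∈ PySem.List.enumerate lines 0, 0 ≤ p.1 ∧ p.1 + 1 ≤ (lines.length : Int) := by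
    intro p hp
    have : p.1 ∈ (PySem.List.enumerate lines 0).map (·.1) := List.mem_map_of_mem hp
    rw [PySem.List.map_fst_enumerate] at this
    have := (PySem.List.mem_pyRange_one).1 this
    omega
  have main : ∀ (l : List (Int × String)) (a : Int),
      (∀ p ∈ l, 0 ≤ p.1 ∧ p.1 + 1 ≤ (lines.length : Int)) →
      0 ≤ a → a ≤ (lines.length : Int) →
      0 ≤ l.foldl (fun acc p => if PySem.Str.startswith p.2 "import " then p.1 + 1 else acc) a
      ∧ l.foldl (fun acc p => if PySem.Str.startswith p.2 "import " then p.1 + 1 else acc) a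
          ≤ (lines.length : Int) := by
    intro l
    induction l with
    | nil => intro a _ h0 h1; exact ⟨h0, h1⟩
    | cons p rest ih =>
        intro a hmem h0 h1
        simp only [List.foldl_cons]
        by_cases hp : PySem.Str.startswith p.2 "import " = true
        · simp only [hp, if_true]
          have := hmem p (List.mem_cons_self ..)
          exact ih _ (fun q hq => hmem q (List.mem_cons_of_mem _ hq)) (by omega) (by omega)
        · simp only [hp]
          exact ih _ (fun q hq => hmem q (List.mem_cons_of_mem _ hq)) h0 h1
  exact main _ 0 hmem le_rfl (by positivity)

-- the crux: B's backward construction, reversed, is A's list with stmt inserted at A's index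
theorem pvBld_eq_insert (stmt : String) (lines : List String) :
    (let out := pvBld stmt lines.reverse false
     let seen := lines.reverse.any (fun l => PySem.Str.startswith l "import ")
     (if !seen then out ++ [stmt] else out).reverse)
      = PySem.List.insert lines
          ((PySem.List.enumerate lines 0).foldl
            (fun acc p => if PySem.Str.startswith p.2 "import " then p.1 + 1 else acc) 0)
          stmt := by
  induction lines using List.reverseRecOn with
  | nil => simp [pvBld, PySem.List.enumerate, PySem.List.insert_zero]
  | append_singleton l last ih =>
      have hbounds := pvFoldl_bounds l
      rw [PySem.List.enumerate_append, List.foldl_append]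
      simp only [List.reverse_append, List.reverse_cons, List.reverse_nil, List.nil_append,
        List.singleton_append, PySem.List.enumerate_cons, PySem.List.enumerate_nil,
        List.foldl_cons, List.foldl_nil, pvBld, List.any_cons]
      cases hlast : PySem.Str.startswith last "import " with
      | true =>
          simp only [Bool.not_false, Bool.and_true, Bool.true_or, Bool.not_true,
            Bool.false_eq_true, reduceIte, pvBld_true, List.reverse_cons, List.reverse_reverse]
          have hcast : (0 : Int) + (l.length : Int) + 1 = ((l.length + 1 : Nat) : Int) := by
            push_cast; ring
          rw [hcast, PySem.List.insert_natCast _ _ _ (by simp), List.take_append]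
          simp
      | false =>
          simp only [hlast, Bool.false_and, Bool.false_eq_true, reduceIte, Bool.false_or,
            List.any_reverse] at *
          set idx : Int := (PySem.List.enumerate l 0).foldl
            (fun acc p => if PySem.Str.startswith p.2 "import " then p.1 + 1 else acc) 0 with hidx
          have hnat : idx = ((idx.toNat : Nat) : Int) := by omega
          have hle : idx.toNat ≤ l.length := by omega
          have hins : PySem.List.insert (l ++ [last]) idx stmt
              = PySem.List.insert l idx stmt ++ [last] := by
            rw [hnat, PySem.List.insert_natCast _ _ _ hle,
              PySem.List.insert_natCast _ _ _ (by simp; omega),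
              List.take_append_of_le_length hle, List.drop_append_of_le_length hle]
            simp
          rw [hins, ← ih]
          split <;> simp

-- ===== VERDICT (by name: the statement is the Claim_ definition above) =====
theorem ensure_import_spec : Claim_equal_ensure_import := by
  intro swift_content module _
  simp only [Spec_ensure_import, ensure_import, ensure_import_alt]
  set stmt := "import " ++ module with hstmt
  set lines := (PySem.Str.split? swift_content "\n").getD [] with hlines
  by_cases h : lines.any (fun line => PySem.Str.isIn stmt line) = true
  · obtain ⟨l, hl, hin⟩ := List.any_eq_true.1 h
    rw [if_pos h, pvGo_none stmt lines.reverse [] false ⟨l, List.mem_reverse.2 hl, hin⟩]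
  · have hall : ∀ l ∈ lines.reverse, PySem.Str.isIn stmt l = false := by
      intro l hl
      have := List.any_eq_false.1 (Bool.eq_false_iff.2 h) l (List.mem_reverse.1 hl)
      simpa using this
    rw [if_neg h, pvGo_some stmt lines.reverse [] false hall]
    simp only [List.nil_append, Bool.false_or]
    rw [← pvBld_eq_insert stmt lines]
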